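-- pv_equiv track=rewrite | github.com/lineaton/pwbm | soca/utilities.py | find_last_row
-- ===== SOURCE A (Python) =====
-- def find_last_row(row_has_number):
--     '''find last row of
--     '''
--     last_row = len(row_has_number)
--     for i in range(75, len(row_has_number) - 5):
--         if row_has_number[i] + row_has_number[i + 1] + row_has_number[i + 2] +\
--         row_has_number[i + 3] + row_has_number[i + 4] == 0:
--             last_row = i
--             break
--     return last_row
-- ===== SOURCE B (Python) =====
-- def find_last_row(row_has_number):
--     '''find last row of
--     '''
--     n = len(row_has_number)
--     # prefix sums: prefix[j] = sum of the first j entries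
--     prefix = [0]
--     s = 0
--     for v in row_has_number:
--         s += v
--         prefix.append(s)
--     for i in range(75, n - 5):
--         if prefix[i + 5] == prefix[i]:
--             return i
--     return n
-- ===== Notes on version B (the rewrite author's own statement) =====
-- stated objective: alternative
-- what changed: B builds a prefix-sum table once and finds the first window whose prefix sums at i and i+5 coincide, instead of A's re-summing the 5-element window at every index.
import Mathlib
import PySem

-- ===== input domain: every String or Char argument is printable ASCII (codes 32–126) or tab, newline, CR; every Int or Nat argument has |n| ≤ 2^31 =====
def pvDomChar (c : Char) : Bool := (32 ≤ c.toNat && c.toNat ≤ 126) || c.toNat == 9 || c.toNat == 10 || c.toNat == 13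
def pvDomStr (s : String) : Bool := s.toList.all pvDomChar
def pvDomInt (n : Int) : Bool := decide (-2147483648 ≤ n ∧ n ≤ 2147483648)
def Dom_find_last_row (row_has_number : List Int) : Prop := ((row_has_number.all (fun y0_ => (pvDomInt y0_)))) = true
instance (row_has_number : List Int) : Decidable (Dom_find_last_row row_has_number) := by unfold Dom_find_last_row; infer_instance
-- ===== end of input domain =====

-- B replaces A's per-index re-summation of the 5-element window by a prefix-sum
-- table scanned once (an alternative decomposition of the same cost class).

-- ===== PORT A =====
-- the 'for i in range(...)' loop with 'break': first index whose window sums to 0, else last_row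
-- (indices i..i+4 are always in range for i ∈ range(75, len-5), so the pyGetD default is never used)
def pvLoopA (xs : List Int) (idxs : List Int) (last_row : Int) : Int :=
  match idxs with
  | [] => last_row
  | i :: rest =>
    if PySem.List.pyGetD xs i 0 + PySem.List.pyGetD xs (i + 1) 0 + PySem.List.pyGetD xs (i + 2) 0 +
       PySem.List.pyGetD xs (i + 3) 0 + PySem.List.pyGetD xs (i + 4) 0 = 0
    then i
    else pvLoopA xs rest last_row

def find_last_row (row_has_number : List Int) : Int :=
  let n : Int := row_has_number.length
  pvLoopA row_has_number (PySem.List.pyRange 75 (n - 5) 1) n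

-- ===== PORT B =====
-- Source B's first loop: s += v; prefix.append(s)
def pvPrefixStep (st : List Int × Int) (v : Int) : List Int × Int :=
  (st.1 ++ [st.2 + v], st.2 + v)

-- Source B's second loop: return first i with prefix[i+5] == prefix[i], else n
def pvLoopB (pref : List Int) (idxs : List Int) (last : Int) : Int :=
  match idxs with
  | [] => last
  | i :: rest =>
    if PySem.List.pyGetD pref (i + 5) 0 = PySem.List.pyGetD pref i 0
    then i
    else pvLoopB pref rest last

def find_last_row_alt (row_has_number : List Int) : Int :=
  let n : Int := row_has_number.length
  let st := row_has_number.foldl pvPrefixStep ([0], 0)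
  pvLoopB st.1 (PySem.List.pyRange 75 (n - 5) 1) n

-- ===== PRECONDITION & SPEC =====
def Spec_find_last_row (row_has_number : List Int) (out : Int) : Prop := out = find_last_row_alt row_has_number
instance (row_has_number : List Int) (out : Int) : Decidable (Spec_find_last_row row_has_number out) := by unfold Spec_find_last_row; infer_instance

-- ===== CLAIM (what is proved, stated in full; the proofs are below) =====
def Claim_equal_find_last_row : Prop := ∀ (row_has_number : List Int), Dom_find_last_row row_has_number → Spec_find_last_row row_has_number (find_last_row row_has_number)

-- ===== LEMMAS AND PROOFS =====

-- pure description of the running prefix sums appended by Source B's first loop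
def pvSums : List Int → Int → List Int
  | [], _ => []
  | v :: t, s => (s + v) :: pvSums t (s + v)

theorem pvPrefix_foldl (xs : List Int) : ∀ (p : List Int) (s : Int),
    xs.foldl pvPrefixStep (p, s) = (p ++ pvSums xs s, s + xs.sum) := by
  induction xs with
  | nil => intro p s; simp [pvSums]
  | cons v t ih =>
    intro p s
    simp only [List.foldl_cons, pvPrefixStep, pvSums, ih, List.append_assoc, List.singleton_append,
      List.sum_cons]
    exact Prod.ext rfl (by ring)

theorem pvSums_getElem? (xs : List Int) : ∀ (s : Int) (j : Nat), j < xs.length →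
    (pvSums xs s)[j]? = some (s + (xs.take (j + 1)).sum) := by
  induction xs with
  | nil => intro s j h; simp at h
  | cons v t ih =>
    intro s j h
    cases j with
    | zero => simp [pvSums]
    | succ j =>
      simp only [pvSums, List.getElem?_cons_succ]
      rw [ih (s + v) j (by simpa using h)]
      simp [List.take_succ_cons, add_assoc]

theorem pvPrefix_get (xs : List Int) (j : Nat) (h : j ≤ xs.length) :
    (0 :: pvSums xs 0).getD j 0 = (xs.take j).sum := by
  cases j with
  | zero => simp
  | succ j =>
    have := pvSums_getElem? xs 0 j (by omega)
    simp [List.getD, this]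

theorem pvTake_succ_sum (xs : List Int) (m : Nat) (h : m < xs.length) :
    (xs.take (m + 1)).sum = (xs.take m).sum + xs.getD m 0 := by
  rw [List.take_add_one, List.sum_append]
  simp [List.getElem?_eq_getElem h, List.getD_eq_getElem?_getD]

theorem pvPred_eq (xs : List Int) (i : Int) (h0 : 0 ≤ i) (h5 : i + 5 ≤ (xs.length : Int)) :
    (PySem.List.pyGetD xs i 0 + PySem.List.pyGetD xs (i + 1) 0 + PySem.List.pyGetD xs (i + 2) 0 +
     PySem.List.pyGetD xs (i + 3) 0 + PySem.List.pyGetD xs (i + 4) 0 = 0) ↔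
    (PySem.List.pyGetD (0 :: pvSums xs 0) (i + 5) 0 = PySem.List.pyGetD (0 :: pvSums xs 0) i 0) := by
  obtain ⟨m, rfl⟩ : ∃ m : Nat, i = (m : Int) := ⟨i.toNat, by omega⟩
  have hm : m + 5 ≤ xs.length := by exact_mod_cast h5
  have c1 : (m : Int) + 1 = ((m + 1 : Nat) : Int) := by push_cast; ring
  have c2 : (m : Int) + 2 = ((m + 2 : Nat) : Int) := by push_cast; ring
  have c3 : (m : Int) + 3 = ((m + 3 : Nat) : Int) := by push_cast; ring
  have c4 : (m : Int) + 4 = ((m + 4 : Nat) : Int) := by push_cast; ring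
  have c5 : (m : Int) + 5 = ((m + 5 : Nat) : Int) := by push_cast; ring
  rw [c1, c2, c3, c4, c5]
  simp only [PySem.List.pyGetD_natCast]
  rw [pvPrefix_get xs (m + 5) (by omega), pvPrefix_get xs m (by omega)]
  have e : ∀ k : Nat, k < 5 → (xs.take (m + k + 1)).sum = (xs.take (m + k)).sum + xs.getD (m + k) 0 := by
    intro k hk; exact pvTake_succ_sum xs (m + k) (by omega)
  have e0 := e 0 (by omega); have e1 := e 1 (by omega); have e2 := e 2 (by omega)
  have e3 := e 3 (by omega); have e4 := e 4 (by omega)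
  simp only [Nat.add_zero] at e0
  have key : (xs.take (m + 5)).sum =
      (xs.take m).sum + xs.getD m 0 + xs.getD (m + 1) 0 + xs.getD (m + 2) 0 +
      xs.getD (m + 3) 0 + xs.getD (m + 4) 0 := by
    have h1 : m + 1 + 1 = m + 2 := by omega
    have h2 : m + 2 + 1 = m + 3 := by omega
    have h3 : m + 3 + 1 = m + 4 := by omega
    have h4 : m + 4 + 1 = m + 5 := by omega
    rw [← h4, e4, ← h3, e3, ← h2, e2, ← h1, e1, e0]
  rw [key]
  constructor <;> intro hh <;> omega

theorem pvLoops_eq (xs : List Int) : ∀ (idxs : List Int) (d : Int),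
    (∀ i ∈ idxs, 0 ≤ i ∧ i + 5 ≤ (xs.length : Int)) →
    pvLoopA xs idxs d = pvLoopB (0 :: pvSums xs 0) idxs d := by
  intro idxs
  induction idxs with
  | nil => intro d _; rfl
  | cons i rest ih =>
    intro d h
    have hi := h i (List.mem_cons_self ..)
    have hp := pvPred_eq xs i hi.1 hi.2
    simp only [pvLoopA, pvLoopB]
    split_ifs with h1 h2
    · rfl
    · exact absurd (hp.mp h1) h2
    · exact absurd (hp.mpr ‹_›) h1
    · exact ih d (fun j hj => h j (List.mem_cons_of_mem _ hj))

-- ===== VERDICT (by name: the statement is the Claim_ definition above) =====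
theorem find_last_row_spec : Claim_equal_find_last_row := by
  intro xs _
  unfold Spec_find_last_row find_last_row find_last_row_alt
  rw [pvPrefix_foldl xs [0] 0]
  simp only [List.singleton_append]
  apply pvLoops_eq
  intro i hi
  rw [PySem.List.mem_pyRange_one] at hi
  omega
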